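-- pv_equiv track=rewrite | github.com/kkyungyoon/study | programmers_Python/0714_4.py | solution
-- ===== SOURCE A (Python) =====
-- def solution(myString):
--     my_list = list(myString)
--     for idx, string in enumerate(my_list):
--         if string == 'a':
--             my_list[idx] = 'A'
--         elif string == 'A':
--             continue
--         else:
--             my_list[idx] = my_list[idx].lower()
--     answer = ''.join(my_list)
--     return answer
-- ===== SOURCE B (Python) =====
-- def solution(myString):
--     return myString.lower().replace('a', 'A')
-- ===== Notes on version B (the rewrite author's own statement) =====
-- stated objective: idiomatic
-- what changed: Replaced the index-by-index loop with explicit per-character branching by two whole-string library passes: lower() the whole string, then replace('a','A').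
import Mathlib
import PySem

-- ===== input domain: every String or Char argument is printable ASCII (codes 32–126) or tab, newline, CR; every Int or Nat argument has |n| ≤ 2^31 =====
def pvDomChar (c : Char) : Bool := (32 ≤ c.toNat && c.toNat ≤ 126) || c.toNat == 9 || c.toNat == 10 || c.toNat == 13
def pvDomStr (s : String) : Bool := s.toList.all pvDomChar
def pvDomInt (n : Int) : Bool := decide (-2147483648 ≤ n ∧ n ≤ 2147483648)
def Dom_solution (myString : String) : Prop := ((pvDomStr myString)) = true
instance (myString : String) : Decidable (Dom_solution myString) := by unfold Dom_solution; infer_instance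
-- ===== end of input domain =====

-- B replaces A's per-character branching loop with two whole-string passes: lower() then replace('a','A').

-- ===== PORT A =====
-- A's per-character branch: 'a' → 'A'; 'A' kept; otherwise lowercased.
def solutionStep (c : Char) : Char :=
  if c = 'a' then 'A'
  else if c = 'A' then c
  else PySem.Chars.lowerChar c

def solution (myString : String) : String :=
  String.ofList (myString.toList.map solutionStep)

-- ===== PORT B =====
def solution_alt (myString : String) : String :=
  PySem.Str.replace (PySem.Str.lower myString) "a" "A"

-- ===== PRECONDITION & SPEC =====
def Spec_solution (myString : String) (out : String) : Prop := out = solution_alt myString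
instance (myString : String) (out : String) : Decidable (Spec_solution myString out) := by unfold Spec_solution; infer_instance

-- ===== CLAIM (what is proved, stated in full; the proofs are below) =====
def Claim_equal_solution : Prop := ∀ (myString : String), Dom_solution myString → Spec_solution myString (solution myString)

-- ===== LEMMAS AND PROOFS =====

-- replace with single-char pattern 'a' and replacement 'A' is a map
lemma replace_go_single (l acc : List Char) :
    PySem.Chars.replace.go ['a'] ['A'] l.length l acc
      = acc.reverse ++ l.map (fun c => if c = 'a' then 'A' else c) := by
  induction l generalizing acc with
  | nil => simp [PySem.Chars.replace.go]
  | cons c t ih =>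
    rw [List.length_cons, PySem.Chars.replace.go]
    by_cases h : c = 'a'
    · subst h
      simp only [List.isPrefixOf, List.cons.injEq, beq_self_eq_true, Bool.and_eq_true,
        List.isPrefixOf_nil_left, and_true, if_pos]
      simp [List.isPrefixOf, ih]
    · have hpre : List.isPrefixOf ['a'] (c :: t) = false := by
        simp [List.isPrefixOf, h]
        exact fun hc => absurd hc.symm h
      simp only [hpre, Bool.false_eq_true, if_false]
      rw [ih]
      simp [h]

lemma replace_single (l : List Char) :
    PySem.Chars.replace l ['a'] ['A'] = l.map (fun c => if c = 'a' then 'A' else c) := by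
  rw [PySem.Chars.replace]
  simp only [List.isEmpty_cons, Bool.false_eq_true, if_false]
  simpa using replace_go_single l []

-- the two per-character functions agree
lemma step_eq (c : Char) :
    solutionStep c = (if PySem.Chars.lowerChar c = 'a' then 'A' else PySem.Chars.lowerChar c) := by
  unfold solutionStep PySem.Chars.lowerChar
  by_cases ha : c = 'a'
  · subst ha; decide
  · by_cases hA : c = 'A'
    · subst hA; decide
    · simp only [ha, hA, if_false]
      by_cases hu : PySem.Chars.isupper c = true
      · simp only [hu, if_pos]
        have hb : 65 ≤ c.toNat ∧ c.toNat ≤ 90 := by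
          simp only [PySem.Chars.isupper, Bool.and_eq_true, decide_eq_true_eq, Char.le_def] at hu
          exact hu
        have hne : Char.ofNat (c.toNat + 32) ≠ 'a' := by
          intro h
          have hv : (Char.ofNat (c.toNat + 32)).toNat = c.toNat + 32 := by
            rw [Char.toNat_ofNat, if_pos (Or.inl (by omega))]
          rw [h] at hv
          have h97 : ('a' : Char).toNat = 97 := by decide
          have h65 : c.toNat = 65 := by omega
          exact hA (Char.ext (UInt32.toNat_inj.mp h65))
        simp [hne]
      · simp only [Bool.not_eq_true] at hu
        simp only [hu, Bool.false_eq_true, if_false, ha, if_false]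

-- ===== VERDICT (by name: the statement is the Claim_ definition above) =====
theorem solution_spec : Claim_equal_solution := by
  intro s _
  unfold Spec_solution solution solution_alt
  apply String.ext
  simp only [PySem.Str.toList_replace, PySem.Str.toList_lower]
  have ha : ("a" : String).toList = ['a'] := rfl
  have hA : ("A" : String).toList = ['A'] := rfl
  rw [ha, hA, replace_single, PySem.Chars.lower, List.map_map]
  rw [String.toList_ofList]
  exact List.map_congr_left (fun c _ => step_eq c)
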